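-- pv_equiv track=rewrite | github.com/vaibhav-jain-dev/learning-algo | problems/200-must-solve/dynamic-programming/14-longest-string-chain/python_code.py | count_all_chains
-- ===== SOURCE A (Python) =====
-- from typing import List, Tuple, Dict
--
-- def count_all_chains(words: List[str], min_length: int = 2) -> int:
--     """
--     Count all distinct chains of at least min_length.
--
--     Args:
--         words: List of words
--         min_length: Minimum chain length to count
--
--     Returns:
--         Number of distinct chains
--     """
--     if not words:
--         return 0
--
--     words.sort(key=len)
--     word_set = set(words)
--
--     def count_chains(word: str) -> int:
--         """Count chains starting with word."""
--         count = 0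
--
--         # Try adding each character at each position
--         for i in range(len(word) + 1):
--             for c in 'abcdefghijklmnopqrstuvwxyz':
--                 next_word = word[:i] + c + word[i:]
--
--                 if next_word in word_set:
--                     count += 1 + count_chains(next_word)
--
--         return count
--
--     # Find all starting words (words with no predecessor in the set)
--     starting_words = []
--     for word in words:
--         has_predecessor = False
--         for i in range(len(word)):
--             pred = word[:i] + word[i + 1:]
--             if pred in word_set:
--                 has_predecessor = True
--                 break
--         if not has_predecessor:
--             starting_words.append(word)
--
--     total = len(words)  # All single-word chains
--     for word in starting_words:
--         total += count_chains(word)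
--
--     return total
-- ===== SOURCE B (Python) =====
-- def count_all_chains(words, min_length=2):
--     """Memoized bottom-up count over the word DAG (A recomputes chain counts
--     exponentially per path); return-value equivalent to A (A also sorts its
--     `words` argument in place, B does not mutate it)."""
--     if not words:
--         return 0
--     word_set = set(words)
--     # distinct words, longest first: every extension is computed before its base
--     order = sorted(dict.fromkeys(words), key=len, reverse=True)
--     cnt = {}
--     for w in order:
--         c = 0
--         for i in range(len(w) + 1):
--             for ch in 'abcdefghijklmnopqrstuvwxyz':
--                 nw = w[:i] + ch + w[i:]
--                 if nw in word_set:
--                     c += 1 + cnt[nw]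
--         cnt[w] = c
--     total = len(words)  # all single-word chains
--     for w in words:
--         if not any(w[:i] + w[i + 1:] in word_set for i in range(len(w))):
--             total += cnt[w]
--     return total
-- ===== Notes on version B (the rewrite author's own statement) =====
-- stated objective: faster
-- what changed: A recounts chains by a fresh recursive DFS for every path (exponential in the number of chain paths); B computes each distinct word's chain count once, bottom-up over the words sorted by decreasing length into a memo dict, then sums the same starting-word totals (B also leaves the input list unmutated, while A sorts it in place; return values are identical).
import Mathlib
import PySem

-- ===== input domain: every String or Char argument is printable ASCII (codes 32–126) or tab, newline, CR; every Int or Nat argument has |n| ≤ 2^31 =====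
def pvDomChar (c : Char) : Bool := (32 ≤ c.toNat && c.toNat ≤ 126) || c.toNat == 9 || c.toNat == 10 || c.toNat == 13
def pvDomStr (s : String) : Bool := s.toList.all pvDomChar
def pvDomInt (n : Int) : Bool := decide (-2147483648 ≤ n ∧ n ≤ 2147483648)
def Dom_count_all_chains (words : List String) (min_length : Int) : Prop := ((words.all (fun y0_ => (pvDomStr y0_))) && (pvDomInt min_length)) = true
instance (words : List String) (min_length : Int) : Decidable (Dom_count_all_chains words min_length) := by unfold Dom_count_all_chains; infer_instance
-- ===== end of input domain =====

-- B replaces A's exponential per-path recursion by one memoized bottom-up pass over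
-- the distinct words in decreasing length order (return-value equivalence; A also
-- sorts its `words` argument in place, B does not mutate it; both ignore min_length,
-- as A does).

-- ===== PORT A =====
-- Words are ported through String.toList; the slices word[:i], word[i:], word[i+1:]
-- are List.take/List.drop, exact for the index ranges the loops produce.

def pvAlphabet : List Char := "abcdefghijklmnopqrstuvwxyz".toList

-- the inner double loop `for i in range(len(word)+1): for c in '…': if word[:i]+c+word[i:] in word_set: …`
-- shared verbatim by A's count_chains and B's per-word pass; `g` is what is added for
-- a found extension (A: the recursive call, B: the memo-table lookup)
def pvStep (s : PySem.Set (List Char)) (g : List Char → Int) (w : List Char) : Int :=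
  (List.range (w.length + 1)).foldl (fun count i =>
    pvAlphabet.foldl (fun count c =>
      if PySem.Set.contains s (w.take i ++ c :: w.drop i)
      then count + 1 + g (w.take i ++ c :: w.drop i)
      else count) count) 0

def pvMaxLen (l : List (List Char)) : Nat := l.foldl (fun m w => max m w.length) 0

-- A's recursive count_chains; the fuel (pvMaxLen wl + 1 at every top-level call) only
-- totalizes the recursion, which Python bounds by the longest word in the set
def pvCountChains (s : PySem.Set (List Char)) : Nat → List Char → Int
  | 0, _ => 0
  | fuel + 1, word => pvStep s (fun nw => pvCountChains s fuel nw) word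

-- A's has_predecessor flag-and-break loop / B's `any(word[:i]+word[i+1:] in word_set …)`
def pvHasPred (s : PySem.Set (List Char)) (w : List Char) : Bool :=
  (List.range w.length).any (fun i => PySem.Set.contains s (w.take i ++ w.drop (i + 1)))

def count_all_chains (words : List String) (min_length : Int) : Int :=
  if words = [] then 0
  else
    let wl := (PySem.List.sorted words PySem.Str.len false).map String.toList  -- words.sort(key=len)
    let wset : PySem.Set (List Char) := PySem.Set.ofList wl
    let starting := wl.filter (fun w => ! pvHasPred wset w)
    starting.foldl (fun total w => total + pvCountChains wset (pvMaxLen wl + 1) w)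
      ((words.length : Int))

-- ===== PORT B =====

-- one body of B's memo loop: cnt[nw] never misses in Python (every strictly longer
-- word of the set is already in cnt); `getD … 0` totalizes that lookup
def pvChainsOf (s : PySem.Set (List Char)) (d : PySem.Dict (List Char) Int) (w : List Char) : Int :=
  pvStep s (fun nw => d.getD nw 0) w

def count_all_chains_alt (words : List String) (min_length : Int) : Int :=
  if words = [] then 0
  else
    let wl := words.map String.toList
    let wset : PySem.Set (List Char) := PySem.Set.ofList wl
    -- sorted(dict.fromkeys(words), key=len, reverse=True)
    let order := PySem.List.sorted (PySem.List.dedup wl) (fun w => w.length) true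
    let cnt := order.foldl (fun d w => d.insert w (pvChainsOf wset d w)) PySem.Dict.empty
    wl.foldl (fun total w => if pvHasPred wset w then total else total + cnt.getD w 0)
      ((words.length : Int))

-- ===== PRECONDITION & SPEC =====
def Spec_count_all_chains (words : List String) (min_length : Int) (out : Int) : Prop := out = count_all_chains_alt words min_length
instance (words : List String) (min_length : Int) (out : Int) : Decidable (Spec_count_all_chains words min_length out) := by unfold Spec_count_all_chains; infer_instance

-- ===== CLAIM (what is proved, stated in full; the proofs are below) =====
def Claim_equal_count_all_chains : Prop := ∀ (words : List String) (min_length : Int), Dom_count_all_chains words min_length → Spec_count_all_chains words min_length (count_all_chains words min_length)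

-- ===== LEMMAS AND PROOFS =====

lemma pvFoldl_id {α β : Type} (l : List α) (a : β) : l.foldl (fun acc _ => acc) a = a := by
  induction l generalizing a with
  | nil => rfl
  | cons x t ih => simp only [List.foldl_cons]; exact ih a

lemma pvLenIns (w : List Char) (i : Nat) (c : Char) :
    (w.take i ++ c :: w.drop i).length = w.length + 1 := by
  simp

lemma pvStep_congr (s t : PySem.Set (List Char)) (g₁ g₂ : List Char → Int) (w : List Char)
    (hst : ∀ x, PySem.Set.contains s x = PySem.Set.contains t x)
    (hg : ∀ nw, PySem.Set.contains t nw = true → nw.length = w.length + 1 → g₁ nw = g₂ nw) :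
    pvStep s g₁ w = pvStep t g₂ w := by
  unfold pvStep
  refine PySem.List.foldl_congr_mem _ _ _ _ ?_
  intro acc i _
  refine PySem.List.foldl_congr_mem _ _ _ _ ?_
  intro acc2 c _
  rw [hst]
  by_cases hc : PySem.Set.contains t (w.take i ++ c :: w.drop i) = true
  · rw [if_pos hc, if_pos hc, hg _ hc (pvLenIns w i c)]
  · rw [if_neg hc, if_neg hc]

lemma pvStep_zero (s : PySem.Set (List Char)) (g : List Char → Int) (w : List Char)
    (hs : ∀ nw, nw.length = w.length + 1 → PySem.Set.contains s nw = false) :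
    pvStep s g w = 0 := by
  unfold pvStep
  rw [PySem.List.foldl_congr_mem _ _ (fun acc _ => acc) _ ?_, pvFoldl_id]
  intro acc i _
  rw [PySem.List.foldl_congr_mem _ _ (fun acc _ => acc) _ ?_, pvFoldl_id]
  intro acc2 c _
  rw [hs _ (pvLenIns w i c)]
  simp

lemma pvFoldlMax_init (l : List (List Char)) : ∀ a : Nat,
    a ≤ l.foldl (fun m w => max m w.length) a := by
  induction l with
  | nil => intro a; exact le_refl a
  | cons y t ih =>
    intro a
    exact le_trans (Nat.le_max_left a y.length) (ih _)

lemma pvMaxLen_bound {x : List Char} {l : List (List Char)} (hx : x ∈ l) :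
    x.length ≤ pvMaxLen l := by
  unfold pvMaxLen
  have aux : ∀ (l : List (List Char)) (a : Nat) (x : List Char), x ∈ l →
      x.length ≤ l.foldl (fun m w => max m w.length) a := by
    intro l
    induction l with
    | nil => intro a x hx; cases hx
    | cons y t ih =>
      intro a x hx
      rcases List.mem_cons.mp hx with h | h
      · subst h
        exact le_trans (Nat.le_max_right a x.length) (pvFoldlMax_init t _)
      · exact ih _ x h
  exact aux l 0 x hx

lemma pvContains_len_le (s : PySem.Set (List Char)) (x : List Char)
    (h : PySem.Set.contains s x = true) : x.length ≤ pvMaxLen s := by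
  exact pvMaxLen_bound (PySem.Set.contains_iff s x |>.mp h)

-- fuel irrelevance: any fuel beyond the remaining head-room gives A's true value
lemma pvCountChains_stable (s : PySem.Set (List Char)) :
    ∀ f g (w : List Char), pvMaxLen s < w.length + f → pvMaxLen s < w.length + g →
      pvCountChains s f w = pvCountChains s g w := by
  intro f
  induction f with
  | zero =>
    intro g w hf hg
    cases g with
    | zero => rfl
    | succ g' =>
      show (0 : Int) = pvStep s _ w
      rw [pvStep_zero]
      intro nw hlen
      by_contra hc
      have := pvContains_len_le s nw (by revert hc; cases PySem.Set.contains s nw <;> simp)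
      omega
  | succ f' ih =>
    intro g w hf hg
    cases g with
    | zero =>
      show pvStep s _ w = (0 : Int)
      rw [pvStep_zero]
      intro nw hlen
      by_contra hc
      have := pvContains_len_le s nw (by revert hc; cases PySem.Set.contains s nw <;> simp)
      omega
    | succ g' =>
      show pvStep s _ w = pvStep s _ w
      refine pvStep_congr s s _ _ w (fun _ => rfl) ?_
      intro nw hc hlen
      have hle := pvContains_len_le s nw hc
      exact ih g' nw (by omega) (by omega)

-- the value of count_chains depends only on set membership
lemma pvCountChains_congr_set (s t : PySem.Set (List Char))
    (h : ∀ x, PySem.Set.contains s x = PySem.Set.contains t x) :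
    ∀ f w, pvCountChains s f w = pvCountChains t f w := by
  intro f
  induction f with
  | zero => intro w; rfl
  | succ f' ih =>
    intro w
    exact pvStep_congr s t _ _ w h (fun nw _ _ => ih nw)

-- a lookup at a key the loop never inserts is frozen
lemma pvMemo_frozen (s : PySem.Set (List Char)) :
    ∀ (l : List (List Char)) (d : PySem.Dict (List Char) Int) (k : List Char), k ∉ l →
      (l.foldl (fun d w => d.insert w (pvChainsOf s d w)) d).getD k 0 = d.getD k 0 := by
  intro l
  induction l with
  | nil => intro d k _; rfl
  | cons w t ih =>
    intro d k hk
    rw [List.foldl_cons, ih _ k (fun h => hk (List.mem_cons_of_mem _ h)),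
      PySem.Dict.getD_insert]
    exact if_neg (fun h : k = w => hk (h ▸ List.mem_cons_self))

-- the memo loop invariant: processing distinct words longest-first, every processed
-- word's entry equals A's count_chains value
lemma pvMemo (s : PySem.Set (List Char)) (F : Nat) (hF : pvMaxLen s < F) :
    ∀ (rest : List (List Char)) (d : PySem.Dict (List Char) Int),
      rest.Nodup →
      List.Pairwise (fun a b => b.length ≤ a.length) rest →
      (∀ w ∈ rest, w ∈ s) →
      (∀ x, d.contains x = true → d.getD x 0 = pvCountChains s F x) →
      (∀ x ∈ s, x ∉ rest → d.contains x = true) →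
      ∀ w ∈ rest,
        (rest.foldl (fun d w => d.insert w (pvChainsOf s d w)) d).getD w 0
          = pvCountChains s F w := by
  intro rest
  induction rest with
  | nil => intro d _ _ _ _ _ w hw; cases hw
  | cons w t ih =>
    intro d hnd hpw hmem h1 h2 w' hw'
    obtain ⟨F', rfl⟩ : ∃ F', F = F' + 1 := ⟨F - 1, by omega⟩
    have hhead : ∀ b ∈ t, b.length ≤ w.length := (List.pairwise_cons.mp hpw).1
    have hc : pvChainsOf s d w = pvCountChains s (F' + 1) w := by
      show pvStep s _ w = pvStep s _ w
      refine pvStep_congr s s _ _ w (fun _ => rfl) ?_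
      intro nw hcont hlen
      have hnwmem : nw ∈ s := (PySem.Set.contains_iff s nw).mp hcont
      have hnwnot : nw ∉ w :: t := by
        intro hin
        rcases List.mem_cons.mp hin with h | h
        · subst h; omega
        · have := hhead nw h; omega
      rw [h1 nw (h2 nw hnwmem hnwnot)]
      have hb := pvContains_len_le s nw hcont
      exact pvCountChains_stable s (F' + 1) F' nw (by omega) (by omega)
    have hwt : w ∉ t := (List.nodup_cons.mp hnd).1
    rw [List.foldl_cons]
    rcases List.mem_cons.mp hw' with h | h
    · subst h
      rw [pvMemo_frozen s t _ w' hwt, PySem.Dict.getD_insert, if_pos rfl]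
      exact hc
    · refine ih (d.insert w (pvChainsOf s d w)) (List.nodup_cons.mp hnd).2
        (List.pairwise_cons.mp hpw).2
        (fun u hu => hmem u (List.mem_cons_of_mem _ hu)) ?_ ?_ w' h
      · intro x hx
        by_cases hxw : x = w
        · subst hxw
          rw [PySem.Dict.getD_insert, if_pos rfl]
          exact hc
        · rw [PySem.Dict.getD_insert, if_neg hxw]
          rw [PySem.Dict.contains_insert] at hx
          refine h1 x ?_
          rcases Bool.or_eq_true_iff.mp hx with h' | h'
          · exact absurd (by exact beq_iff_eq.mp h') hxw
          · exact h'
      · intro x hxs hxt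
        rw [PySem.Dict.contains_insert]
        by_cases hxw : x = w
        · subst hxw; simp
        · refine Bool.or_eq_true_iff.mpr (Or.inr (h2 x hxs ?_))
          intro hin
          rcases List.mem_cons.mp hin with h' | h'
          · exact hxw h'
          · exact hxt h'

-- pvMaxLen is monotone under element inclusion
lemma pvMaxLen_le {l : List (List Char)} {n : Nat} (h : ∀ x ∈ l, x.length ≤ n) :
    pvMaxLen l ≤ n := by
  unfold pvMaxLen
  have aux : ∀ (l : List (List Char)) (a : Nat), a ≤ n → (∀ x ∈ l, x.length ≤ n) →
      l.foldl (fun m w => max m w.length) a ≤ n := by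
    intro l
    induction l with
    | nil => intro a ha _; exact ha
    | cons y t ih =>
      intro a ha hl
      exact ih _ (Nat.max_le.mpr ⟨ha, hl y List.mem_cons_self⟩)
        (fun x hx => hl x (List.mem_cons_of_mem _ hx))
  exact aux l 0 (Nat.zero_le n) h

lemma pvSum_filter (p : List Char → Bool) (f : List Char → Int) :
    ∀ l : List (List Char),
      ((l.filter p).map f).sum = (l.map (fun w => if p w then f w else 0)).sum := by
  intro l
  induction l with
  | nil => rfl
  | cons x t ih =>
    by_cases hx : p x
    · simp [hx, ih]
    · simp [hx, ih]

-- ===== VERDICT (by name: the statement is the Claim_ definition above) =====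
theorem count_all_chains_spec : Claim_equal_count_all_chains := by
  unfold Claim_equal_count_all_chains
  intro words min_length _
  unfold Spec_count_all_chains
  by_cases hw : words = []
  · simp [count_all_chains, count_all_chains_alt, hw]
  · simp only [count_all_chains, count_all_chains_alt, if_neg hw]
    set wlA := (PySem.List.sorted words PySem.Str.len false).map String.toList with hwlA
    set wlB := words.map String.toList with hwlB
    have hperm : wlA.Perm wlB := (PySem.List.sorted_perm words PySem.Str.len false).map String.toList
    set sA := PySem.Set.ofList wlA with hsA
    set sB := PySem.Set.ofList wlB with hsB
    have hcont : ∀ x, PySem.Set.contains sA x = PySem.Set.contains sB x := by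
      intro x
      rw [Bool.eq_iff_iff, PySem.Set.contains_iff, PySem.Set.contains_iff,
        hsA, hsB, PySem.Set.mem_ofList, PySem.Set.mem_ofList]
      exact hperm.mem_iff
    set F := pvMaxLen wlA + 1 with hF
    have hFA : pvMaxLen sB < F := by
      have : pvMaxLen sB ≤ pvMaxLen wlA := by
        refine pvMaxLen_le ?_
        intro x hx
        exact pvMaxLen_bound (hperm.mem_iff.mpr ((PySem.Set.mem_ofList wlB x).mp hx))
      omega
    set cc := fun w => pvCountChains sB F w with hcc
    set order := PySem.List.sorted (PySem.List.dedup wlB) (fun w => w.length) true with horder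
    set cnt := order.foldl (fun d w => d.insert w (pvChainsOf sB d w)) PySem.Dict.empty with hcnt
    have hmemo : ∀ w ∈ order, cnt.getD w 0 = cc w := by
      refine pvMemo sB F hFA order PySem.Dict.empty ?_ ?_ ?_ ?_ ?_
      · exact ((PySem.List.sorted_perm _ _ true).nodup_iff).mpr (PySem.List.nodup_dedup wlB)
      · exact PySem.List.sorted_pairwise_rev (PySem.List.dedup wlB) (fun w => w.length)
      · intro u hu
        have := (PySem.List.mem_sorted _ _ true u).mp hu
        rwa [PySem.List.dedup_eq_ofList] at this
      · intro x hx
        rw [PySem.Dict.contains_empty] at hx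
        cases hx
      · intro x hxs hxnot
        exfalso
        refine hxnot ((PySem.List.mem_sorted _ _ true x).mpr ?_)
        rwa [PySem.List.dedup_eq_ofList]
    have hmemB : ∀ w ∈ wlB, cnt.getD w 0 = cc w := by
      intro w hwm
      refine hmemo w ((PySem.List.mem_sorted _ _ true w).mpr ?_)
      rw [PySem.List.dedup_eq_ofList]
      exact (PySem.Set.mem_ofList wlB w).mpr hwm
    -- A's fold = len + sum over wlA
    rw [PySem.List.foldl_add]
    -- B's fold body rewritten additively, then = len + sum over wlB
    rw [PySem.List.foldl_congr_mem wlB _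
      (fun total w => total + (if pvHasPred sB w then 0 else cnt.getD w 0)) _
      (by intro acc x _; by_cases h : pvHasPred sB x <;> simp [h])]
    rw [PySem.List.foldl_add]
    congr 1
    rw [pvSum_filter]
    have hmapA : wlA.map (fun w => if (!pvHasPred sA w) = true then pvCountChains sA F w else 0)
        = wlA.map (fun w => if pvHasPred sB w then 0 else cc w) := by
      refine List.map_congr_left ?_
      intro x _
      have hpred : pvHasPred sA x = pvHasPred sB x := by
        unfold pvHasPred
        simp only [hcont]
      rw [hpred, hcc]
      have hccx : pvCountChains sA F x = pvCountChains sB F x :=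
        pvCountChains_congr_set sA sB hcont F x
      by_cases h : pvHasPred sB x <;> simp [h, hccx]
    have hmapB : wlB.map (fun w => if pvHasPred sB w then 0 else cnt.getD w 0)
        = wlB.map (fun w => if pvHasPred sB w then 0 else cc w) := by
      refine List.map_congr_left ?_
      intro x hx
      by_cases h : pvHasPred sB x <;> simp [h, hmemB x hx]
    rw [hmapA, hmapB]
    exact (hperm.map _).sum_eq
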